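-- pv_equiv track=rewrite | github.com/Prasanna-kethireddy/Maangtechology | PYTHON/remove_nth.py | occurence
-- ===== SOURCE A (Python) =====
-- def occurence(list,element):
--     count=0
--     for i in range(len(list)):
--         if list[i]==element:
--             count+=1
--             if count>1:
--                 del list[i]
--                 return list
--     return list
-- ===== SOURCE B (Python) =====
-- def occurence(list, element):
--     positions = [i for i, x in enumerate(list) if x == element]
--     if len(positions) >= 2:
--         del list[positions[1]]
--     return list
-- ===== Notes on version B (the rewrite author's own statement) =====
-- stated objective: alternative
-- what changed: Replaced A's single scan that counts occurrences and deletes inside the loop by a two-stage decomposition: one comprehension over enumerate collecting all occurrence positions, then a single indexed delete of the second position if it exists.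
import Mathlib
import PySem

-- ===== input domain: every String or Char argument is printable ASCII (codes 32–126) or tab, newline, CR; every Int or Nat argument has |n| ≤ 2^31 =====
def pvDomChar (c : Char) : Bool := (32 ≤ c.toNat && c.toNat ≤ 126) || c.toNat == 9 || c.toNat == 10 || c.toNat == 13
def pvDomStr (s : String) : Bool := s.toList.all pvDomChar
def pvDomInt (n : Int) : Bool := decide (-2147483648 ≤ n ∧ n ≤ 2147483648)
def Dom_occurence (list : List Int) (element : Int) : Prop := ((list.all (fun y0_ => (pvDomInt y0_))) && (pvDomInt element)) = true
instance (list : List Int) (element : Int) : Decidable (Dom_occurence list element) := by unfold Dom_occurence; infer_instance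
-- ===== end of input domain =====

-- ===== PORT A =====
-- B replaces A's scan-with-counter-and-delete by one comprehension collecting all occurrence
-- positions followed by a single indexed delete (a different decomposition, same O(n) cost);
-- both mutate the list in place identically (one del), so return-value equality covers the effect.

-- A's loop: scan indices from i, `count` = occurrences seen so far; on the occurrence that
-- makes count > 1, delete that index and return.
def occurenceGo (orig : List Int) (element : Int) (i : Nat) (count : Int) : List Int :=
  if h : i < orig.length then
    if orig[i] = element then
      if count + 1 > 1 then orig.eraseIdx i
      else occurenceGo orig element (i + 1) (count + 1)
    else occurenceGo orig element (i + 1) count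
  else orig
termination_by orig.length - i

def occurence (list : List Int) (element : Int) : List Int :=
  occurenceGo list element 0 0

-- ===== PORT B =====
-- Source B: positions = [i for i, x in enumerate(list) if x == element];
-- if len(positions) >= 2: del list[positions[1]].  enumerate indices are ≥ 0, so
-- `.toNat` on positions[1] is exact for Python's del list[p].
def occurence_alt (list : List Int) (element : Int) : List Int :=
  let positions :=
    ((PySem.List.enumerate list).filter (fun p => p.2 == element)).map Prod.fst
  match positions with
  | _ :: p :: _ => list.eraseIdx p.toNat
  | _ => list

-- ===== PRECONDITION & SPEC =====
def Spec_occurence (list : List Int) (element : Int) (out : List Int) : Prop := out = occurence_alt list element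
instance (list : List Int) (element : Int) (out : List Int) : Decidable (Spec_occurence list element out) := by unfold Spec_occurence; infer_instance

-- ===== CLAIM (what is proved, stated in full; the proofs are below) =====
def Claim_equal_occurence : Prop := ∀ (list : List Int) (element : Int), Dom_occurence list element → Spec_occurence list element (occurence list element)

-- ===== LEMMAS AND PROOFS =====

-- A's loop with count = 1: deletes at the next occurrence at or after index i.
theorem occurenceGo_one_aux (l : List Int) (e : Int) :
    ∀ n i, l.length - i ≤ n →
      occurenceGo l e i 1 =
        match PySem.List.index? (l.drop i) e with
        | none => l
        | some j => l.eraseIdx (i + j) := by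
  intro n
  induction n with
  | zero =>
    intro i hi
    have h : ¬ i < l.length := by omega
    have hd : l.drop i = [] := List.drop_eq_nil_of_le (by omega)
    rw [occurenceGo, dif_neg h, hd]
    simp [PySem.List.index?]
  | succ n ih =>
    intro i hi
    by_cases h : i < l.length
    · rw [occurenceGo, dif_pos h, List.drop_eq_getElem_cons h]
      by_cases he : l[i] = e
      · rw [if_pos he, if_pos (by omega), he, PySem.List.index?_cons_self]
        simp
      · rw [if_neg he, ih (i + 1) (by omega), PySem.List.index?_cons_of_ne _ he]
        cases PySem.List.index? (l.drop (i + 1)) e with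
        | none => rfl
        | some j => simp [Nat.add_comm, Nat.add_left_comm]
    · have hd : l.drop i = [] := List.drop_eq_nil_of_le (by omega)
      rw [occurenceGo, dif_neg h, hd]
      simp [PySem.List.index?]

theorem occurenceGo_one (l : List Int) (e : Int) (i : Nat) :
    occurenceGo l e i 1 =
      match PySem.List.index? (l.drop i) e with
      | none => l
      | some j => l.eraseIdx (i + j) :=
  occurenceGo_one_aux l e l.length i (by omega)

-- A's loop with count = 0: skips to just past the first occurrence, then runs with count = 1.
theorem occurenceGo_zero_aux (l : List Int) (e : Int) :
    ∀ n i, l.length - i ≤ n →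
      occurenceGo l e i 0 =
        match PySem.List.index? (l.drop i) e with
        | none => l
        | some j => occurenceGo l e (i + j + 1) 1 := by
  intro n
  induction n with
  | zero =>
    intro i hi
    have h : ¬ i < l.length := by omega
    have hd : l.drop i = [] := List.drop_eq_nil_of_le (by omega)
    rw [occurenceGo, dif_neg h, hd]
    simp [PySem.List.index?]
  | succ n ih =>
    intro i hi
    by_cases h : i < l.length
    · rw [occurenceGo, dif_pos h, List.drop_eq_getElem_cons h]
      by_cases he : l[i] = e
      · rw [if_pos he, if_neg (by omega), he, PySem.List.index?_cons_self]
        norm_num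
      · rw [if_neg he, ih (i + 1) (by omega), PySem.List.index?_cons_of_ne _ he]
        cases PySem.List.index? (l.drop (i + 1)) e with
        | none => rfl
        | some j => simp [Nat.add_comm, Nat.add_left_comm]
    · have hd : l.drop i = [] := List.drop_eq_nil_of_le (by omega)
      rw [occurenceGo, dif_neg h, hd]
      simp [PySem.List.index?]

theorem occurenceGo_zero (l : List Int) (e : Int) (i : Nat) :
    occurenceGo l e i 0 =
      match PySem.List.index? (l.drop i) e with
      | none => l
      | some j => occurenceGo l e (i + j + 1) 1 :=
  occurenceGo_zero_aux l e l.length i (by omega)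

-- B's comprehension: the positions list, characterised through index? one occurrence at a time.
theorem positions_char (e : Int) :
    ∀ (l : List Int) (s : Int),
      ((PySem.List.enumerate l s).filter (fun p => p.2 == e)).map Prod.fst =
        match PySem.List.index? l e with
        | none => []
        | some f => (s + (f : Int)) ::
            ((PySem.List.enumerate (l.drop (f + 1)) (s + (f : Int) + 1)).filter
              (fun p => p.2 == e)).map Prod.fst := by
  intro l
  induction l with
  | nil => intro s; simp [PySem.List.enumerate_nil, PySem.List.index?]
  | cons x t ih =>
    intro s
    rw [PySem.List.enumerate_cons]
    by_cases he : x = e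
    · subst he
      rw [PySem.List.index?_cons_self]
      simp
    · rw [PySem.List.index?_cons_of_ne _ he]
      have hfilter : ((s, x) :: PySem.List.enumerate t (s + 1)).filter (fun p => p.2 == e) =
          (PySem.List.enumerate t (s + 1)).filter (fun p => p.2 == e) := by
        simp [he]
      rw [hfilter, ih (s + 1)]
      cases PySem.List.index? t e with
      | none => rfl
      | some f =>
        simp only [Option.map_some, List.drop_succ_cons]
        push_cast
        ring_nf

-- ===== VERDICT (by name: the statement is the Claim_ definition above) =====
theorem occurence_spec : Claim_equal_occurence := by
  intro l e _
  unfold Spec_occurence occurence occurence_alt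
  rw [occurenceGo_zero]
  simp only [List.drop_zero, Nat.zero_add]
  rw [positions_char]
  cases hf : PySem.List.index? l e with
  | none => rfl
  | some f =>
    simp only
    rw [occurenceGo_one, positions_char]
    cases hj : PySem.List.index? (l.drop (f + 1)) e with
    | none => rfl
    | some j =>
      simp only
      congr 1
      omega
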